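-- pv_equiv track=rewrite | github.com/oliveira-prg/trabalhoemerson | bancada-5/predicados.py | gerar_interpretacoes
-- ===== SOURCE A (Python) =====
-- import itertools
--
-- def gerar_interpretacoes(dominio, nomes_pred_unarios):
--     """
--     Para cada predicado P, interpretação é subconjunto de domínio.
--     Gera todas as combinações possíveis (cartesiano).
--     """
--     dominio_set = list(dominio)
--     todas_interps = []
--
--     subconjuntos = []
--     for _ in nomes_pred_unarios:
--         pred_subs = []
--         for mask in range(1 << len(dominio_set)):
--             subs = {dominio_set[i] for i in range(len(dominio_set)) if (mask & (1 << i))}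
--             pred_subs.append(subs)
--         subconjuntos.append(pred_subs)
--
--     for escolha in itertools.product(*subconjuntos):
--         interp = {}
--         for nome, conj in zip(nomes_pred_unarios, escolha):
--             interp[nome] = conj
--         todas_interps.append(interp)
--
--     return todas_interps
-- ===== SOURCE B (Python) =====
-- def gerar_interpretacoes(dominio, nomes_pred_unarios):
--     """
--     Mesma semantica de A, por outro algoritmo: a j-esima interpretacao e
--     computada diretamente decodificando o indice j em digitos na base
--     2^|dominio| (digito mais significativo = primeiro predicado); cada
--     digito indexa uma tabela mascara->subconjunto construida uma unica vez.
--     Nada de listas de subconjuntos por predicado nem produto cartesiano.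
--     """
--     n = len(dominio)
--     base = 1 << n
--     tabela = [{dominio[i] for i in range(n) if m >> i & 1} for m in range(base)]
--     resultado = []
--     for j in range(base ** len(nomes_pred_unarios)):
--         digitos = []
--         rem = j
--         for _ in nomes_pred_unarios:
--             digitos.append(rem % base)
--             rem //= base
--         digitos.reverse()
--         resultado.append({nome: tabela[m] for nome, m in zip(nomes_pred_unarios, digitos)})
--     return resultado
-- ===== Notes on version B (the rewrite author's own statement) =====
-- stated objective: alternative
-- what changed: B computes the j-th interpretation directly by decoding the index j into base-2^|dominio| digits via repeated divmod (each digit is the subset mask for one predicate), instead of materializing one subset list per predicate and enumerating their itertools.product.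
import Mathlib
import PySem

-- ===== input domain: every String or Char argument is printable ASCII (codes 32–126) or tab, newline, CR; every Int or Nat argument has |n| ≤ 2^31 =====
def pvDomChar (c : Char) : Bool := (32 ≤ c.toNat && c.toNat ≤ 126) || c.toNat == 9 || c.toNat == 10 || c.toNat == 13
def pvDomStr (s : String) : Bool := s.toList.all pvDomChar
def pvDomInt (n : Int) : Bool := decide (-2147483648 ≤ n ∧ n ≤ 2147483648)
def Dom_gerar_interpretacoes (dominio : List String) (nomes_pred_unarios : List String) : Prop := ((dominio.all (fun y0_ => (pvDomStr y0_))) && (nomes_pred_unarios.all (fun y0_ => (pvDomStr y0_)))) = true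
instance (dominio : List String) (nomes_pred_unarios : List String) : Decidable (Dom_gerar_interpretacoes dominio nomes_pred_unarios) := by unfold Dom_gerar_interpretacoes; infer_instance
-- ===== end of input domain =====

-- B replaces the per-predicate subset lists + itertools.product with direct mixed-radix
-- decoding of the running index j into base-2^|dominio| digit masks; same return value as A.

-- ===== PORT A =====
-- shared helper: the subset comprehension both Pythons contain
-- ('{dominio[i] for i in range(n) if <bit i of mask>}'); exact: a Python set
-- is PySem.Set.ofList of the generated elements, index i always in range.
def pvSubset (dominio : List String) (mask : Nat) : List String :=
  PySem.Set.ofList ((List.range dominio.length).filterMap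
    (fun i => if mask.testBit i then some (dominio.getD i "") else none))

-- A's pred_subs list: one subset per mask in range(1 << n)
def pvSubconjuntos (dominio : List String) : List (List String) :=
  (List.range (2 ^ dominio.length)).map (pvSubset dominio)

-- itertools.product(*lists), leftmost factor varying slowest (exact order of itertools.product)
def pvProduct {α : Type} (ls : List (List α)) : List (List α) :=
  match ls with
  | [] => [[]]
  | l :: rest => l.flatMap (fun x => (pvProduct rest).map (fun esc => x :: esc))

def gerar_interpretacoes (dominio : List String) (nomes_pred_unarios : List String) :
    List (List (String × List String)) :=
  -- subconjuntos: one (identical) pred_subs list per predicate name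
  let subconjuntos := nomes_pred_unarios.map (fun _ => pvSubconjuntos dominio)
  (pvProduct subconjuntos).map (fun escolha =>
    ((nomes_pred_unarios.zip escolha).foldl
      (fun (interp : PySem.Dict String (List String)) nc => interp.insert nc.1 nc.2)
      PySem.Dict.empty).items)

-- ===== PORT B =====
-- Source B: mask->subset table built once; for each j in range(base**k), digit list built
-- LSB-first by divmod, reversed, then the dict comprehension over zip(nomes, digitos)
-- (ported as a fold of inserts). tabela[m]: m = rem % base < base always, so the plain
-- Python indexing never raises and getD is exact here.
def gerar_interpretacoes_alt (dominio : List String) (nomes_pred_unarios : List String) :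
    List (List (String × List String)) :=
  let base := 2 ^ dominio.length
  let tabela := (List.range base).map (pvSubset dominio)
  (List.range (base ^ nomes_pred_unarios.length)).map (fun j =>
    let st := nomes_pred_unarios.foldl
      (fun (st : Nat × List Nat) _ => (st.1 / base, st.2 ++ [st.1 % base])) (j, [])
    let digitos := st.2.reverse
    ((nomes_pred_unarios.zip digitos).foldl
      (fun (interp : PySem.Dict String (List String)) nd =>
        interp.insert nd.1 (tabela.getD nd.2 []))
      PySem.Dict.empty).items)

-- ===== PRECONDITION & SPEC =====
def Spec_gerar_interpretacoes (dominio : List String) (nomes_pred_unarios : List String) (out : List (List (String × List String))) : Prop := out = gerar_interpretacoes_alt dominio nomes_pred_unarios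
instance (dominio : List String) (nomes_pred_unarios : List String) (out : List (List (String × List String))) : Decidable (Spec_gerar_interpretacoes dominio nomes_pred_unarios out) := by unfold Spec_gerar_interpretacoes; infer_instance

-- ===== CLAIM (what is proved, stated in full; the proofs are below) =====
def Claim_equal_gerar_interpretacoes : Prop := ∀ (dominio : List String) (nomes_pred_unarios : List String), Dom_gerar_interpretacoes dominio nomes_pred_unarios → Spec_gerar_interpretacoes dominio nomes_pred_unarios (gerar_interpretacoes dominio nomes_pred_unarios)

-- ===== LEMMAS AND PROOFS =====
-- LSB-first base-`base` digits of j, k of them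
def pvDigitsLSF (base : Nat) : Nat → Nat → List Nat
  | 0, _ => []
  | k+1, j => j % base :: pvDigitsLSF base k (j / base)

-- B's inner digit loop computes pvDigitsLSF
lemma pv_fold_digits (base : Nat) :
    ∀ (nomes : List String) (j : Nat) (acc : List Nat),
      nomes.foldl (fun (st : Nat × List Nat) _ => (st.1 / base, st.2 ++ [st.1 % base])) (j, acc)
        = (j / base ^ nomes.length, acc ++ pvDigitsLSF base nomes.length j) := by
  intro nomes
  induction nomes with
  | nil => intro j acc; simp [pvDigitsLSF]
  | cons n nomes ih =>
      intro j acc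
      rw [List.foldl_cons, ih]
      simp [pvDigitsLSF, pow_succ', Nat.div_div_eq_div_mul]

lemma pv_digits_split (base : Nat) (hb : 0 < base) :
    ∀ (k : Nat) (m j' : Nat), m < base → j' < base ^ k →
      pvDigitsLSF base (k+1) (m * base ^ k + j') = pvDigitsLSF base k j' ++ [m] := by
  intro k
  induction k with
  | zero =>
      intro m j' hm hj'
      have hz : j' = 0 := by simpa using hj'
      subst hz
      simp [pvDigitsLSF, Nat.mod_eq_of_lt hm]
  | succ k ih =>
      intro m j' hm hj'
      have h1 : m * base ^ (k+1) + j' = base * (m * base ^ k) + j' := by ring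
      have hd : j' / base < base ^ k := by
        have : j' < base ^ k * base := by rw [← pow_succ]; exact hj'
        exact Nat.div_lt_of_lt_mul (by rw [Nat.mul_comm]; exact this)
      show (m * base ^ (k+1) + j') % base :: pvDigitsLSF base (k+1) ((m * base ^ (k+1) + j') / base)
          = (j' % base :: pvDigitsLSF base k (j' / base)) ++ [m]
      rw [h1, Nat.mul_add_mod, Nat.mul_add_div hb, ih m (j' / base) hm hd]
      simp

-- range (a*b) split into blocks
lemma pv_range_mul (a b : Nat) :
    List.range (a * b) = (List.range a).flatMap (fun m => (List.range b).map (fun r => m * b + r)) := by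
  induction a with
  | zero => simp
  | succ a ih =>
      have : (a+1) * b = a * b + b := by ring
      rw [this, List.range_add, List.range_succ, ih]
      simp

-- the cartesian product of k copies of range base = all MSB-first digit strings
lemma pv_prod_digits (base : Nat) (hb : 0 < base) :
    ∀ k, pvProduct (List.replicate k (List.range base))
      = (List.range (base ^ k)).map (fun j => (pvDigitsLSF base k j).reverse) := by
  intro k
  induction k with
  | zero => simp [pvProduct, pvDigitsLSF]
  | succ k ih =>
      show (List.range base).flatMap
          (fun m => (pvProduct (List.replicate k (List.range base))).map (fun esc => m :: esc)) = _
      rw [ih]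
      have hp : base ^ (k+1) = base * base ^ k := by ring
      rw [hp, pv_range_mul, List.map_flatMap]
      rw [List.flatMap_def, List.flatMap_def, ← List.map_congr_left]
      intro m hm
      rw [List.map_map, List.map_map, ← List.map_congr_left]
      intro j' hj'
      simp only [Function.comp]
      rw [pv_digits_split base hb k m j' (List.mem_range.mp hm) (List.mem_range.mp hj')]
      simp

-- pvProduct commutes with mapping each factor elementwise
lemma pv_prod_map {α β : Type} (g : α → β) :
    ∀ (ls : List (List α)),
      pvProduct (ls.map (List.map g)) = (pvProduct ls).map (List.map g) := by
  intro ls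
  induction ls with
  | nil => simp [pvProduct]
  | cons l rest ih =>
      simp [pvProduct, ih, List.flatMap_map, List.map_flatMap, List.map_map, Function.comp_def]

-- every digit produced by the decode is < base
lemma pv_digits_lt (base : Nat) (hb : 0 < base) :
    ∀ (k j m : Nat), m ∈ pvDigitsLSF base k j → m < base := by
  intro k
  induction k with
  | zero => intro j m hm; simp [pvDigitsLSF] at hm
  | succ k ih =>
      intro j m hm
      rcases (by simpa [pvDigitsLSF] using hm) with h | h
      · exact h ▸ Nat.mod_lt _ hb
      · exact ih _ _ h

-- table lookup at an in-range index
lemma pv_range_map_getD {α : Type} (f : Nat → α) (b m : Nat) (d : α) (hm : m < b) :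
    ((List.range b).map f).getD m d = f m := by
  simp [List.getD_eq_getElem?_getD, List.getElem?_range hm]

-- folding inserts over zip with a mapped list = applying the map inside the insert
lemma pv_fold_zip_map (g : Nat → List String) (nomes : List String) (ms : List Nat)
    (d : PySem.Dict String (List String)) :
    (nomes.zip (ms.map g)).foldl
        (fun (interp : PySem.Dict String (List String)) nc => interp.insert nc.1 nc.2) d
      = (nomes.zip ms).foldl (fun interp nd => interp.insert nd.1 (g nd.2)) d := by
  rw [List.zip_map_right, List.foldl_map]
  simp [Prod.map]

-- ===== VERDICT (by name: the statement is the Claim_ definition above) =====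
theorem gerar_interpretacoes_spec : Claim_equal_gerar_interpretacoes := by
  intro dominio nomes _
  show gerar_interpretacoes dominio nomes = gerar_interpretacoes_alt dominio nomes
  simp only [gerar_interpretacoes, gerar_interpretacoes_alt]
  have hb : 0 < 2 ^ dominio.length := pow_pos (by norm_num) _
  have hc : nomes.map (fun _ => pvSubconjuntos dominio)
      = (List.replicate nomes.length (List.range (2 ^ dominio.length))).map
          (List.map (pvSubset dominio)) := by
    simp [pvSubconjuntos, List.map_const']
  rw [hc, pv_prod_map, pv_prod_digits _ hb, List.map_map, List.map_map, ← List.map_congr_left]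
  intro j hj
  simp only [Function.comp]
  rw [pv_fold_digits, pv_fold_zip_map]
  simp only [List.nil_append]
  refine congrArg PySem.Dict.items ?_
  apply PySem.List.foldl_congr_mem
  intro acc nd hnd
  obtain ⟨nm, m⟩ := nd
  have hm : m < 2 ^ dominio.length :=
    pv_digits_lt _ hb _ _ _ (List.mem_reverse.mp (List.of_mem_zip hnd).2)
  rw [pv_range_map_getD _ _ _ _ hm]
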